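-- pv_equiv track=rewrite | github.com/yumiao20071126/AWorld | aworld/core/context/processor/chunk_processor.py | _string_to_tool_messages
-- ===== SOURCE A (Python) =====
-- from typing import List, Dict, Any, Optional, Union, Tuple
--
-- def _string_to_tool_messages(content: str, original_prompt: Union[str, List[Dict[str, str]]]) -> List[Dict[str, str]]:
--     """Convert string to tool message format"""
--     messages = []
--     lines = content.split('\n')
--     current_role = 'tool'
--     current_content = []
--     current_tool_call_id = ''
--     current_name = ''
--
--     for line in lines:
--         line = line.strip()
--         if line.startswith('[') and ']:' in line:
--             # Save previous message
--             if current_content: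
--                 msg = {
--                     'role': current_role,
--                     'content': '\n'.join(current_content).strip()
--                 }
--                 if current_role == 'tool':
--                     if current_tool_call_id:
--                         msg['tool_call_id'] = current_tool_call_id
--                     if current_name:
--                         msg['name'] = current_name
--                 messages.append(msg)
--                 current_content = []
--
--             # Parse new role and tool information
--             role_end = line.find(']:')
--             role_part = line[1:role_end]
--             content_part = line[role_end + 2:].strip()
--
--             if role_part.startswith('TOOL:'):
--                 # Parse tool message format: [TOOL:name:tool_call_id]
--                 current_role = 'tool'
--                 tool_parts = role_part.split(':')
--                 if len(tool_parts) >= 2: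
--                     current_name = tool_parts[1]
--                 if len(tool_parts) >= 3:
--                     current_tool_call_id = tool_parts[2]
--             else:
--                 current_role = role_part.lower()
--                 current_tool_call_id = ''
--                 current_name = ''
--
--             if content_part:
--                 current_content.append(content_part)
--         else:
--             current_content.append(line)
--
--     # Save last message
--     if current_content:
--         msg = {
--             'role': current_role,
--             'content': '\n'.join(current_content).strip()
--         }
--         if current_role == 'tool':
--             if current_tool_call_id:
--                 msg['tool_call_id'] = current_tool_call_id
--             if current_name:
--                 msg['name'] = current_name
--         messages.append(msg)
--
--     # If no messages parsed, return original format
--     if not messages and isinstance(original_prompt, list):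
--         return original_prompt
--     elif not messages:
--         return [{'role': 'tool', 'content': content}]
--
--     return messages
-- ===== SOURCE B (Python) =====
-- def _string_to_tool_messages(content, original_prompt):
--     """Convert string to tool message format (two-pass: segment, then emit)."""
--     # Pass 1: split stripped lines into segments at header lines '[...]:'
--     segments = [(None, [])]
--     for raw in content.split('\n'):
--         line = raw.strip()
--         if line.startswith('[') and ']:' in line:
--             segments.append((line, []))
--         else:
--             segments[-1][1].append(line)
--     # Pass 2: emit one message per segment with content, carrying tool state
--     messages = []
--     role, name, call_id = 'tool', '', ''
--     for header, body in segments: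
--         pieces = []
--         if header is not None:
--             cut = header.find(']:')
--             role_part = header[1:cut]
--             rest = header[cut + 2:].strip()
--             if role_part.startswith('TOOL:'):
--                 role = 'tool'
--                 parts = role_part.split(':')
--                 if len(parts) >= 2:
--                     name = parts[1]
--                 if len(parts) >= 3:
--                     call_id = parts[2]
--             else:
--                 role, name, call_id = role_part.lower(), '', ''
--             if rest:
--                 pieces.append(rest)
--         pieces.extend(body)
--         if pieces:
--             msg = {'role': role, 'content': '\n'.join(pieces).strip()}
--             if role == 'tool':
--                 if call_id:
--                     msg['tool_call_id'] = call_id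
--                 if name:
--                     msg['name'] = name
--             messages.append(msg)
--     if not messages and isinstance(original_prompt, list):
--         return original_prompt
--     if not messages:
--         return [{'role': 'tool', 'content': content}]
--     return messages
-- ===== Notes on version B (the rewrite author's own statement) =====
-- stated objective: alternative
-- what changed: A's single stateful line loop (accumulating content and flushing a message whenever the next header or the end of input is reached) is replaced by a two-pass decomposition: pass 1 splits the stripped lines into segments at header lines '[...]:', pass 2 parses each segment's header and emits at most one message per segment, carrying the tool name/call-id state across segments.
import Mathlib
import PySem

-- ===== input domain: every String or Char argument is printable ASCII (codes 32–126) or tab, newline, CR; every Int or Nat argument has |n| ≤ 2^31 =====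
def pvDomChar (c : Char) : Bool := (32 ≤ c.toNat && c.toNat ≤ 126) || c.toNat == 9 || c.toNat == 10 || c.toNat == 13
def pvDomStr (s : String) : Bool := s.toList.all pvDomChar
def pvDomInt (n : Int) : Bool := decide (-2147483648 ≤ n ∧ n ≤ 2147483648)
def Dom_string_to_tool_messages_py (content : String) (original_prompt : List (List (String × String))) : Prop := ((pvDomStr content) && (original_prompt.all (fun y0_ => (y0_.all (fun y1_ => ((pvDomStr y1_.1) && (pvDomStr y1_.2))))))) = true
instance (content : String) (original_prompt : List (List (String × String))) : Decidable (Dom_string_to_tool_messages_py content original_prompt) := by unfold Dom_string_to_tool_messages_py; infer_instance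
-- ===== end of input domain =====

-- B re-decomposes A's single stateful line loop into two passes (segment at header lines, then emit
-- per segment); same return value, objective: alternative decomposition (no speed claim).

-- ===== PORT A =====
-- message dict build: keys in Python insertion order role, content, tool_call_id, name
def pvMsgA (role : String) (content : List String) (cid name : String) : List (String × String) :=
  [("role", role), ("content", PySem.Str.strip (PySem.Str.join "\n" content))] ++
    (if role == "tool" then
      (if cid != "" then [("tool_call_id", cid)] else []) ++
        (if name != "" then [("name", name)] else [])
     else [])

-- one iteration of A's for-loop; state = (messages, current_role, current_content, current_tool_call_id, current_name)
def pvStepA (s : List (List (String × String)) × String × List String × String × String)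
    (raw : String) : List (List (String × String)) × String × List String × String × String :=
  let (msgs, role, content, cid, name) := s
  let line := PySem.Str.strip raw
  if PySem.Str.startswith line "[" && PySem.Str.isIn "]:" line then
    let msgs' := if content.isEmpty then msgs else msgs ++ [pvMsgA role content cid name]
    let roleEnd := PySem.Str.find line "]:"
    let rolePart := PySem.Str.slice line (some 1) (some roleEnd)
    let contentPart := PySem.Str.strip (PySem.Str.slice line (some (roleEnd + 2)) none)
    let st :=
      if PySem.Str.startswith rolePart "TOOL:" then
        let parts := (PySem.Str.split? rolePart ":").getD []
        let name' := if 2 ≤ parts.length then parts.getD 1 "" else name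
        let cid' := if 3 ≤ parts.length then parts.getD 2 "" else cid
        ("tool", cid', name')
      else (PySem.Str.lower rolePart, "", "")
    let content' := if contentPart == "" then ([] : List String) else [contentPart]
    (msgs', st.1, content', st.2.1, st.2.2)
  else (msgs, role, content ++ [line], cid, name)

def string_to_tool_messages_py (content : String)
    (original_prompt : List (List (String × String))) : List (List (String × String)) :=
  let lines := (PySem.Str.split? content "\n").getD []
  let s := lines.foldl pvStepA ([], "tool", [], "", "")
  -- save last message
  let msgs := if s.2.2.1.isEmpty then s.1 else s.1 ++ [pvMsgA s.2.1 s.2.2.1 s.2.2.2.1 s.2.2.2.2]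
  -- original_prompt is a list here, so the isinstance(list) fallback applies
  if msgs.isEmpty then original_prompt else msgs

-- ===== PORT B =====
-- pass 1: append to the current segment's body, or start a new segment at a header line
def pvSegStep (acc : List (Option String × List String) × (Option String × List String))
    (raw : String) : List (Option String × List String) × (Option String × List String) :=
  let line := PySem.Str.strip raw
  if PySem.Str.startswith line "[" && PySem.Str.isIn "]:" line then
    (acc.1 ++ [acc.2], (some line, []))
  else (acc.1, (acc.2.1, acc.2.2 ++ [line]))

def pvMsgB (role : String) (pieces : List String) (cid name : String) : List (String × String) :=
  [("role", role), ("content", PySem.Str.strip (PySem.Str.join "\n" pieces))] ++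
    (if role == "tool" then
      (if cid != "" then [("tool_call_id", cid)] else []) ++
        (if name != "" then [("name", name)] else [])
     else [])

-- pass 2: one segment → (possibly) one message; state = (messages, role, name, call_id)
def pvSegEmit (st : List (List (String × String)) × String × String × String)
    (seg : Option String × List String) : List (List (String × String)) × String × String × String :=
  let (msgs, role, name, cid) := st
  let upd :=
    match seg.1 with
    | none => (role, name, cid, ([] : List String))
    | some h =>
      let cut := PySem.Str.find h "]:"
      let rolePart := PySem.Str.slice h (some 1) (some cut)
      let rest := PySem.Str.strip (PySem.Str.slice h (some (cut + 2)) none)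
      let pre := if rest == "" then ([] : List String) else [rest]
      if PySem.Str.startswith rolePart "TOOL:" then
        let parts := (PySem.Str.split? rolePart ":").getD []
        ("tool", (if 2 ≤ parts.length then parts.getD 1 "" else name),
          (if 3 ≤ parts.length then parts.getD 2 "" else cid), pre)
      else (PySem.Str.lower rolePart, "", "", pre)
  let pieces := upd.2.2.2 ++ seg.2
  let msgs' := if pieces.isEmpty then msgs else msgs ++ [pvMsgB upd.1 pieces upd.2.2.1 upd.2.1]
  (msgs', upd.1, upd.2.1, upd.2.2.1)

def string_to_tool_messages_py_alt (content : String)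
    (original_prompt : List (List (String × String))) : List (List (String × String)) :=
  let r := ((PySem.Str.split? content "\n").getD []).foldl pvSegStep ([], (none, []))
  let segments := r.1 ++ [r.2]
  let msgs := (segments.foldl pvSegEmit ([], "tool", "", "")).1
  if msgs.isEmpty then original_prompt else msgs

-- ===== PRECONDITION & SPEC =====
def Spec_string_to_tool_messages_py (content : String) (original_prompt : List (List (String × String))) (out : List (List (String × String))) : Prop := out = string_to_tool_messages_py_alt content original_prompt
instance (content : String) (original_prompt : List (List (String × String))) (out : List (List (String × String))) : Decidable (Spec_string_to_tool_messages_py content original_prompt out) := by unfold Spec_string_to_tool_messages_py; infer_instance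

-- ===== CLAIM (what is proved, stated in full; the proofs are below) =====
def Claim_equal_string_to_tool_messages_py : Prop := ∀ (content : String) (original_prompt : List (List (String × String))), Dom_string_to_tool_messages_py content original_prompt → Spec_string_to_tool_messages_py content original_prompt (string_to_tool_messages_py content original_prompt)

-- ===== LEMMAS AND PROOFS =====

@[simp] theorem pvMsgB_eq_pvMsgA (r : String) (c : List String) (i n : String) :
    pvMsgB r c i n = pvMsgA r c i n := rfl

-- effect of a (possible) header line on the (role, name, call_id) state, plus the header's
-- own first content piece
def pvApply : Option String → String → String → String → String × String × String × List String
  | none, role, name, cid => (role, name, cid, [])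
  | some h, _role, name, cid =>
      let cut := PySem.Str.find h "]:"
      let rolePart := PySem.Str.slice h (some 1) (some cut)
      let rest := PySem.Str.strip (PySem.Str.slice h (some (cut + 2)) none)
      let pre := if rest == "" then ([] : List String) else [rest]
      if PySem.Str.startswith rolePart "TOOL:" then
        let parts := (PySem.Str.split? rolePart ":").getD []
        ("tool", (if 2 ≤ parts.length then parts.getD 1 "" else name),
          (if 3 ≤ parts.length then parts.getD 2 "" else cid), pre)
      else (PySem.Str.lower rolePart, "", "", pre)

-- common recursive description of the message stream produced from the remaining lines,
-- given the current role/content/call_id/name state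
def pvR : List String → String → List String → String → String → List (List (String × String))
  | [], role, content, cid, name =>
      if content.isEmpty then [] else [pvMsgA role content cid name]
  | raw :: L, role, content, cid, name =>
      let line := PySem.Str.strip raw
      if PySem.Str.startswith line "[" && PySem.Str.isIn "]:" line then
        (if content.isEmpty then [] else [pvMsgA role content cid name]) ++
          (let u := pvApply (some line) role name cid
           pvR L u.1 u.2.2.2 u.2.2.1 u.2.1)
      else pvR L role (content ++ [line]) cid name

theorem pvSegEmit_eq (st : List (List (String × String)) × String × String × String)
    (seg : Option String × List String) :
    pvSegEmit st seg
      = (let u := pvApply seg.1 st.2.1 st.2.2.1 st.2.2.2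
         let pieces := u.2.2.2 ++ seg.2
         ((if pieces.isEmpty then st.1 else st.1 ++ [pvMsgA u.1 pieces u.2.2.1 u.2.1]),
          u.1, u.2.1, u.2.2.1)) := by
  obtain ⟨msgs, role, name, cid⟩ := st
  obtain ⟨hdr, body⟩ := seg
  cases hdr <;> simp [pvSegEmit, pvApply]

-- A's fold, flushed at the end, computes pvR
theorem pvA_run (L : List String) (msgs : List (List (String × String)))
    (role : String) (content : List String) (cid name : String) :
    (if (L.foldl pvStepA (msgs, role, content, cid, name)).2.2.1.isEmpty = true
     then (L.foldl pvStepA (msgs, role, content, cid, name)).1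
     else (L.foldl pvStepA (msgs, role, content, cid, name)).1 ++
       [pvMsgA (L.foldl pvStepA (msgs, role, content, cid, name)).2.1
         (L.foldl pvStepA (msgs, role, content, cid, name)).2.2.1
         (L.foldl pvStepA (msgs, role, content, cid, name)).2.2.2.1
         (L.foldl pvStepA (msgs, role, content, cid, name)).2.2.2.2])
      = msgs ++ pvR L role content cid name := by
  induction L generalizing msgs role content cid name with
  | nil => simp only [List.foldl_nil, pvR]; split <;> simp
  | cons raw L ih =>
    simp only [List.foldl_cons, pvStepA, pvR, pvApply]
    by_cases hc : (PySem.Str.startswith (PySem.Str.strip raw) "[" &&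
        PySem.Str.isIn "]:" (PySem.Str.strip raw)) = true
    · simp only [if_pos hc]
      rw [ih]
      split_ifs <;> simp [List.append_assoc]
    · simp only [if_neg hc]
      exact ih ..

-- pass-1 fold only appends to the finished-segments list
theorem pvSegFold_append (L : List String) (done : List (Option String × List String))
    (cur : Option String × List String) :
    L.foldl pvSegStep (done, cur)
      = (done ++ (L.foldl pvSegStep ([], cur)).1, (L.foldl pvSegStep ([], cur)).2) := by
  induction L generalizing done cur with
  | nil => simp
  | cons raw L ih =>
    simp only [List.foldl_cons, pvSegStep]
    split
    · rw [ih (done ++ [cur]), ih ([] ++ [cur])]; simp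
    · exact ih done _

-- B's two passes, started from an arbitrary open segment and state, compute pvR
theorem pvB_eq_pvR (L : List String) (hdr : Option String) (body : List String)
    (msgs : List (List (String × String))) (role name cid : String) :
    ((((L.foldl pvSegStep ([], (hdr, body))).1 ++ [(L.foldl pvSegStep ([], (hdr, body))).2]).foldl
        pvSegEmit (msgs, role, name, cid)).1)
      = msgs ++ (let u := pvApply hdr role name cid
                 pvR L u.1 (u.2.2.2 ++ body) u.2.2.1 u.2.1) := by
  induction L generalizing hdr body msgs role name cid with
  | nil =>
    simp [List.foldl_nil, List.nil_append, List.foldl_cons, pvSegEmit_eq, pvR]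
    try split <;> simp
  | cons raw L ih =>
    simp only [List.foldl_cons, pvSegStep]
    by_cases hc : (PySem.Str.startswith (PySem.Str.strip raw) "[" &&
        PySem.Str.isIn "]:" (PySem.Str.strip raw)) = true
    · simp only [if_pos hc]
      rw [pvSegFold_append]
      simp only [List.cons_append, List.nil_append, List.foldl_cons, pvSegEmit_eq]
      try dsimp only
      rw [ih]
      simp only [pvR, pvApply, if_pos hc]
      try dsimp only
      split_ifs <;> simp [List.append_assoc]
    · simp only [if_neg hc]
      rw [ih]
      simp only [pvR, if_neg hc]
      simp [List.append_assoc]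

-- ===== VERDICT (by name: the statement is the Claim_ definition above) =====
theorem string_to_tool_messages_py_spec : Claim_equal_string_to_tool_messages_py := by
  intro content original_prompt _
  show string_to_tool_messages_py content original_prompt
      = string_to_tool_messages_py_alt content original_prompt
  simp only [string_to_tool_messages_py, string_to_tool_messages_py_alt]
  rw [pvA_run, pvB_eq_pvR]
  simp [pvApply]
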